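-- pv_equiv track=rewrite | github.com/karnation22/Project_Euler_Problems | pandigital.py | isPanDigital
-- ===== SOURCE A (Python) =====
-- import copy
--
-- def isPanDigital(fac1, fac2, number, pandigitalList):
-- 	copyPan = copy.copy(pandigitalList) #stupid aliasing bullshit
-- 	strNum = str(fac1) + str(fac2) + str(number)
-- 	if(len(strNum) != 9): return False #it has to be a nine digit number
-- 	for letnum in strNum:
-- 		if(int(letnum) not in copyPan): return False #if a number isn't in the list, it is false
-- 		else: copyPan.remove(int(letnum)) #remove a number after we are done with it
-- 	return True
-- ===== SOURCE B (Python) =====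
-- def isPanDigital(fac1, fac2, number, pandigitalList):
--     strNum = str(fac1) + str(fac2) + str(number)
--     if len(strNum) != 9:
--         return False
--     digits = [int(c) for c in strNum]
--     return all(digits.count(d) <= pandigitalList.count(d) for d in set(digits))
-- ===== Notes on version B (the rewrite author's own statement) =====
-- stated objective: simpler
-- what changed: Replaces A's mutating remove-one-by-one loop over a copied list with a single multiset-containment check: compare the count of each distinct digit against its count in pandigitalList.
import Mathlib
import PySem

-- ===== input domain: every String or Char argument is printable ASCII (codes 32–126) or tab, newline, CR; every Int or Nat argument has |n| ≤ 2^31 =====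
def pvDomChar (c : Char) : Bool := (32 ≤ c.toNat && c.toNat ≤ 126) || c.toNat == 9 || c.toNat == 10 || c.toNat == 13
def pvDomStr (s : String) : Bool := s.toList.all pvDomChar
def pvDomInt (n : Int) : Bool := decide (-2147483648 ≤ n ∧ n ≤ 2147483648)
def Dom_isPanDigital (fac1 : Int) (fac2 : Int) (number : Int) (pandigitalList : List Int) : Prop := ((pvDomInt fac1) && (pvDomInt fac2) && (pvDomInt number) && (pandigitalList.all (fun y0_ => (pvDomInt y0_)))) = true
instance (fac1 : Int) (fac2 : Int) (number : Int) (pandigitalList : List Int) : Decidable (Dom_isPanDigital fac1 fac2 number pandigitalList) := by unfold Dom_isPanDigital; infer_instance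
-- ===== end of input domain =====

-- B replaces A's copy-and-remove digit loop with a single multiset-containment check
-- (count of each distinct digit vs its count in pandigitalList); objective: simpler, no speed claim.

-- int(c) for a single decimal digit character; exact on '0'..'9' (the only chars reached inside Pre_)
def pvDigit (c : Char) : Int := (c.toNat : Int) - 48

-- ===== PORT A =====
-- the for-loop over strNum with the mutating copyPan accumulator
def panLoop : List Char → List Int → Bool
  | [], _ => true
  | c :: rest, pan =>
      if pan.contains (pvDigit c) then panLoop rest (pan.erase (pvDigit c))  -- list.remove = erase first occurrence
      else false

def isPanDigital (fac1 : Int) (fac2 : Int) (number : Int) (pandigitalList : List Int) : Bool :=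
  let strNum := PySem.Int.toChars fac1 ++ PySem.Int.toChars fac2 ++ PySem.Int.toChars number
  if strNum.length ≠ 9 then false
  else panLoop strNum pandigitalList

-- ===== PORT B =====
def isPanDigital_alt (fac1 : Int) (fac2 : Int) (number : Int) (pandigitalList : List Int) : Bool :=
  let strNum := PySem.Int.toChars fac1 ++ PySem.Int.toChars fac2 ++ PySem.Int.toChars number
  if strNum.length ≠ 9 then false
  else
    let digits := strNum.map pvDigit
    (PySem.Set.ofList digits).all (fun d => decide (digits.count d ≤ pandigitalList.count d))

-- ===== PRECONDITION & SPEC =====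
-- Pre_ excludes exactly the inputs where the 9-character concatenation contains a '-' sign:
-- there int('-') raises ValueError in both Pythons.
def Pre_isPanDigital (fac1 : Int) (fac2 : Int) (number : Int) (_pandigitalList : List Int) : Prop :=
  (PySem.Int.toChars fac1 ++ PySem.Int.toChars fac2 ++ PySem.Int.toChars number).length = 9 →
    (0 ≤ fac1 ∧ 0 ≤ fac2 ∧ 0 ≤ number)
instance (fac1 : Int) (fac2 : Int) (number : Int) (pandigitalList : List Int) : Decidable (Pre_isPanDigital fac1 fac2 number pandigitalList) := by unfold Pre_isPanDigital; infer_instance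

def pvWitness_isPanDigital : Int × Int × Int × List Int := (12, 345, 6789, [1,2,3,4,5,6,7,8,9])

def Spec_isPanDigital (fac1 : Int) (fac2 : Int) (number : Int) (pandigitalList : List Int) (out : Bool) : Prop := out = isPanDigital_alt fac1 fac2 number pandigitalList
instance (fac1 : Int) (fac2 : Int) (number : Int) (pandigitalList : List Int) (out : Bool) : Decidable (Spec_isPanDigital fac1 fac2 number pandigitalList out) := by unfold Spec_isPanDigital; infer_instance

-- ===== CLAIM (what is proved, stated in full; the proofs are below) =====
def Claim_equal_isPanDigital : Prop := ∀ (fac1 : Int) (fac2 : Int) (number : Int) (pandigitalList : List Int), Dom_isPanDigital fac1 fac2 number pandigitalList → Pre_isPanDigital fac1 fac2 number pandigitalList → Spec_isPanDigital fac1 fac2 number pandigitalList (isPanDigital fac1 fac2 number pandigitalList)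

-- ===== LEMMAS AND PROOFS =====

-- A's remove-loop succeeds iff the digit multiset is contained in pan (count-wise)
lemma panLoop_iff (cs : List Char) (pan : List Int) :
    panLoop cs pan = true ↔ ∀ d, List.count d (cs.map pvDigit) ≤ List.count d pan := by
  induction cs generalizing pan with
  | nil => simp [panLoop]
  | cons c rest ih =>
      simp only [panLoop, List.map_cons]
      by_cases h : pvDigit c ∈ pan
      · rw [if_pos (by simpa using h), ih]
        constructor
        · intro hall d
          by_cases hd : d = pvDigit c
          · subst hd
            have h1 := hall (pvDigit c)
            rw [List.count_erase_self] at h1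
            rw [List.count_cons_self]
            have hp : 1 ≤ List.count (pvDigit c) pan := List.one_le_count_iff.mpr h
            omega
          · have h1 := hall d
            rw [List.count_erase_of_ne hd] at h1
            rw [List.count_cons_of_ne (Ne.symm hd)]
            exact h1
        · intro hall d
          by_cases hd : d = pvDigit c
          · subst hd
            have h1 := hall (pvDigit c)
            rw [List.count_cons_self] at h1
            rw [List.count_erase_self]
            omega
          · have h1 := hall d
            rw [List.count_cons_of_ne (Ne.symm hd)] at h1
            rw [List.count_erase_of_ne hd]
            exact h1
      · rw [if_neg (by simpa using h)]
        simp only [Bool.false_eq_true, false_iff]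
        intro hall
        have h1 := hall (pvDigit c)
        rw [List.count_cons_self] at h1
        have hz : List.count (pvDigit c) pan = 0 := List.count_eq_zero.mpr h
        omega

-- B's all-over-distinct-digits check is the same containment
lemma alt_iff (ds : List Int) (pan : List Int) :
    ((PySem.Set.ofList ds).all (fun d => decide (List.count d ds ≤ List.count d pan)) = true)
      ↔ ∀ d, List.count d ds ≤ List.count d pan := by
  rw [List.all_eq_true]
  constructor
  · intro hall d
    by_cases hm : d ∈ ds
    · simpa using hall d ((PySem.Set.mem_ofList ds d).mpr hm)
    · simp [List.count_eq_zero.mpr hm]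
  · intro hall d _
    simpa using hall d

-- ===== VERDICT (by name: the statement is the Claim_ definition above) =====
theorem isPanDigital_spec : Claim_equal_isPanDigital := by
  intro f1 f2 n pan _ _
  unfold Spec_isPanDigital isPanDigital isPanDigital_alt
  by_cases h : (PySem.Int.toChars f1 ++ PySem.Int.toChars f2 ++ PySem.Int.toChars n).length ≠ 9
  · rw [if_pos h, if_pos h]
  · rw [if_neg h, if_neg h, Bool.eq_iff_iff, panLoop_iff, alt_iff]
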